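-- pv_equiv track=rewrite | github.com/jeudicode/naming-game | V0/Agent.py | getPreference
-- ===== SOURCE A (Python) =====
-- def getPreference(own_word, other_word):
--     # Initialize counters of how similar is the word to the current favourite one
--     similar_letters = {}
--     similar_pair_of_letters = {}
--     n = len(own_word)
--     for i in range(n):
--         similar_letters[own_word[i]] = 1
--         if i + 1 < n:
--             similar_pair_of_letters[own_word[i] + own_word[i + 1]] = 1
--
--     # Checks preference
--     preference = 0
--     n = len(other_word)
--     for i in range(n):
--         # Check if similar letter
--         if (other_word[i] in similar_letters):
--             preference += 1
--         # Check if similar pair of letters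
--         if (i + 1 < n):
--             a = other_word[i]
--             b = other_word[i + 1]
--             c = a + b
--             if (c in similar_pair_of_letters):
--                 preference += 1
--     return preference
-- ===== SOURCE B (Python) =====
-- def getPreference(own_word, other_word):
--     # Build frequency tables of other_word's letters and consecutive bigrams,
--     # then sum the frequencies of own_word's distinct letters and bigrams.
--     letter_count = {}
--     for ch in other_word:
--         letter_count[ch] = letter_count.get(ch, 0) + 1
--     bigram_count = {}
--     for i in range(len(other_word) - 1):
--         pair = other_word[i:i + 2]
--         bigram_count[pair] = bigram_count.get(pair, 0) + 1
--
--     own_letters = set(own_word)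
--     own_bigrams = {own_word[i:i + 2] for i in range(len(own_word) - 1)}
--
--     return sum(letter_count.get(ch, 0) for ch in own_letters) \
--          + sum(bigram_count.get(p, 0) for p in own_bigrams)
-- ===== Notes on version B (the rewrite author's own statement) =====
-- stated objective: alternative
-- what changed: B reverses the traversal: instead of scanning other_word and testing membership in dicts of own_word's letters/bigrams, it builds frequency counters of other_word's letters and bigrams once and sums the looked-up counts over own_word's distinct letters and distinct bigrams.
import Mathlib
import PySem

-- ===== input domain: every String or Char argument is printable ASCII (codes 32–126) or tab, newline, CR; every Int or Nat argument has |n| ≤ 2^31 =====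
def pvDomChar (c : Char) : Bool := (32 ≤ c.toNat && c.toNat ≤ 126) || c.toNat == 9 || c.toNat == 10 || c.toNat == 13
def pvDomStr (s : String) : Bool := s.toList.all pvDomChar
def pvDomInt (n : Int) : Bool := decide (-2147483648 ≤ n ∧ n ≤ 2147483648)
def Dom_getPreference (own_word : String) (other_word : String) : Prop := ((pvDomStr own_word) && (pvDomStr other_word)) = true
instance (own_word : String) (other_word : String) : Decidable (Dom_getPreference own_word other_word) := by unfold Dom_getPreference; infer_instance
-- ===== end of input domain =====

-- B reverses A's traversal: it builds frequency counters of other_word's letters and bigrams,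
-- then sums the looked-up counts over own_word's DISTINCT letters and bigrams (objective: alternative).

-- ===== PORT A =====
-- A's bigram dict key own_word[i]+own_word[i+1] (a 2-char string) is modelled exactly by the pair of chars.
def getPreference (own_word : String) (other_word : String) : Int :=
  let cs := own_word.toList
  let n := cs.length
  let dicts :=
    (List.range n).foldl
      (fun (st : PySem.Dict Char Int × PySem.Dict (Char × Char) Int) i =>
        let st := (st.1.insert (cs.getD i ' ') 1, st.2)
        if i + 1 < n then (st.1, st.2.insert (cs.getD i ' ', cs.getD (i + 1) ' ') 1) else st)
      (PySem.Dict.empty, PySem.Dict.empty)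
  let similar_letters := dicts.1
  let similar_pair_of_letters := dicts.2
  let ts := other_word.toList
  let m := ts.length
  (List.range m).foldl
    (fun pref i =>
      let pref := if similar_letters.contains (ts.getD i ' ') then pref + 1 else pref
      if i + 1 < m then
        let a := ts.getD i ' '
        let b := ts.getD (i + 1) ' '
        let c := (a, b)
        if similar_pair_of_letters.contains c then pref + 1 else pref
      else pref)
    0

-- ===== PORT B =====
def getPreference_alt (own_word : String) (other_word : String) : Int :=
  let ts := other_word.toList
  let letter_count : PySem.Dict Char Int :=
    ts.foldl (fun d ch => d.insert ch (d.getD ch 0 + 1)) PySem.Dict.empty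
  let bigram_count : PySem.Dict (Char × Char) Int :=
    ((List.range (ts.length - 1)).map (fun i => (ts.getD i ' ', ts.getD (i + 1) ' '))).foldl
      (fun d p => d.insert p (d.getD p 0 + 1)) PySem.Dict.empty
  let cs := own_word.toList
  let own_letters : PySem.Set Char := PySem.Set.ofList cs
  let own_bigrams : PySem.Set (Char × Char) :=
    PySem.Set.ofList ((List.range (cs.length - 1)).map (fun i => (cs.getD i ' ', cs.getD (i + 1) ' ')))
  (own_letters.map (fun ch => letter_count.getD ch 0)).sum
    + (own_bigrams.map (fun p => bigram_count.getD p 0)).sum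

-- ===== PRECONDITION & SPEC =====
def Spec_getPreference (own_word : String) (other_word : String) (out : Int) : Prop := out = getPreference_alt own_word other_word
instance (own_word : String) (other_word : String) (out : Int) : Decidable (Spec_getPreference own_word other_word out) := by unfold Spec_getPreference; infer_instance

-- ===== CLAIM (what is proved, stated in full; the proofs are below) =====
def Claim_equal_getPreference : Prop := ∀ (own_word : String) (other_word : String), Dom_getPreference own_word other_word → Spec_getPreference own_word other_word (getPreference own_word other_word)

-- ===== LEMMAS AND PROOFS =====

-- the list of consecutive bigrams of xs (as char pairs)
def pvPairs (xs : List Char) : List (Char × Char) :=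
  (List.range (xs.length - 1)).map (fun i => (xs.getD i ' ', xs.getD (i + 1) ' '))

theorem pvMapPairs (t : List Char) (F : Char × Char → Int) :
    (pvPairs t).map F
    = (List.range (t.length - 1)).map (fun i => F (t.getD i ' ', t.getD (i + 1) ' ')) := by
  rw [pvPairs, List.map_map]; rfl

theorem pvMapRange_getD (xs : List Char) (d : Char) :
    (List.range xs.length).map (fun i => xs.getD i d) = xs := by
  apply List.ext_getElem
  · simp
  · intro i h1 h2
    simp only [List.getElem_map, List.getElem_range]
    rw [List.getD_eq_getElem xs d h2]

theorem pvFilterRange (n : Nat) :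
    (List.range n).filter (fun i => decide (i + 1 < n)) = List.range (n - 1) := by
  cases n with
  | zero => rfl
  | succ k =>
    rw [List.range_succ, List.filter_append]
    simp only [Nat.succ_sub_one]
    have h1 : (List.range k).filter (fun i => decide (i + 1 < k + 1)) = List.range k := by
      apply List.filter_eq_self.mpr
      intro a ha
      simp only [List.mem_range] at ha
      simp [ha]
    rw [h1]
    simp

theorem pvSumMapAdd {α : Type} (l : List α) (f g : α → Int) :
    (l.map (fun x => f x + g x)).sum = (l.map f).sum + (l.map g).sum := by
  induction l with
  | nil => simp
  | cons x l ih => simp [ih]; ring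

-- splitting A's dict-building loop (two independent accumulators)
theorem pvAFoldSplit (cs : List Char) (n : Nat) (l : List Nat)
    (d1 : PySem.Dict Char Int) (d2 : PySem.Dict (Char × Char) Int) :
    l.foldl
      (fun (st : PySem.Dict Char Int × PySem.Dict (Char × Char) Int) i =>
        let st := (st.1.insert (cs.getD i ' ') 1, st.2)
        if i + 1 < n then (st.1, st.2.insert (cs.getD i ' ', cs.getD (i + 1) ' ') 1) else st)
      (d1, d2)
    = (l.foldl (fun d i => d.insert (cs.getD i ' ') 1) d1,
       l.foldl (fun d i => if i + 1 < n then d.insert (cs.getD i ' ', cs.getD (i + 1) ' ') 1 else d) d2) := by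
  induction l generalizing d1 d2 with
  | nil => rfl
  | cons x l ih =>
    simp only [List.foldl_cons]
    by_cases hx : x + 1 < n
    · simp only [hx, if_pos]; exact ih _ _
    · simp only [hx, if_neg, not_false_iff]; exact ih _ _

-- membership in A's letter dict
theorem pvSlContains (cs : List Char) (x : Char) :
    (((List.range cs.length).foldl (fun (d : PySem.Dict Char Int) i => d.insert (cs.getD i ' ') 1)
        PySem.Dict.empty).contains x = true) ↔ x ∈ cs := by
  rw [PySem.Dict.contains_iff_mem_keys,
    PySem.Dict.keys_foldl_insert_key (List.range cs.length) (fun i => cs.getD i ' ')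
      (fun _ _ => (1 : Int)) PySem.Dict.empty]
  rw [PySem.Dict.keys_empty, pvMapRange_getD]
  rw [PySem.Set.mem_update]
  simp

-- membership in A's bigram dict
theorem pvSpContains (cs : List Char) (p : Char × Char) :
    (((List.range cs.length).foldl
        (fun (d : PySem.Dict (Char × Char) Int) i =>
          if i + 1 < cs.length then d.insert (cs.getD i ' ', cs.getD (i + 1) ' ') 1 else d)
        PySem.Dict.empty).contains p = true) ↔ p ∈ pvPairs cs := by
  rw [PySem.List.foldl_ite_eq_foldl_filter, pvFilterRange]
  rw [PySem.Dict.contains_iff_mem_keys,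
    PySem.Dict.keys_foldl_insert_key (List.range (cs.length - 1))
      (fun i => (cs.getD i ' ', cs.getD (i + 1) ' ')) (fun _ _ => (1 : Int)) PySem.Dict.empty]
  rw [PySem.Dict.keys_empty, PySem.Set.mem_update]
  simp [pvPairs]

-- A's counting loop as a sum of indicators
theorem pvALoopEq (sl : PySem.Dict Char Int) (sp : PySem.Dict (Char × Char) Int)
    (ts : List Char) (m : Nat) (l : List Nat) (a : Int) :
    l.foldl
      (fun pref i =>
        let pref := if sl.contains (ts.getD i ' ') then pref + 1 else pref
        if i + 1 < m then
          let a := ts.getD i ' '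
          let b := ts.getD (i + 1) ' '
          let c := (a, b)
          if sp.contains c then pref + 1 else pref
        else pref)
      a
    = a + (l.map (fun i =>
        (if sl.contains (ts.getD i ' ') then (1 : Int) else 0)
        + (if i + 1 < m ∧ sp.contains (ts.getD i ' ', ts.getD (i + 1) ' ') then (1 : Int) else 0))).sum := by
  rw [← PySem.List.foldl_add]
  apply PySem.List.foldl_congr_mem
  intro acc x _
  dsimp only
  split_ifs <;> simp_all
  omega

-- dropping the i+1<m gate: the last index never fires
theorem pvGateDrop (m : Nat) (P : Nat → Prop) [DecidablePred P] :
    ((List.range m).map (fun i => if i + 1 < m ∧ P i then (1 : Int) else 0)).sum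
    = ((List.range (m - 1)).map (fun i => if P i then (1 : Int) else 0)).sum := by
  cases m with
  | zero => rfl
  | succ k =>
    rw [List.range_succ, List.map_append, List.sum_append]
    simp only [Nat.succ_sub_one]
    have h1 : (List.range k).map (fun i => if i + 1 < k + 1 ∧ P i then (1 : Int) else 0)
        = (List.range k).map (fun i => if P i then (1 : Int) else 0) := by
      apply List.map_congr_left
      intro a ha
      simp only [List.mem_range] at ha
      have : a + 1 < k + 1 := by omega
      simp [this]
    rw [h1]
    simp

-- indicator sum over a nodup list
theorem pvNodupInd {α : Type} [BEq α] [LawfulBEq α] [DecidableEq α] (L : List α) (hL : L.Nodup) (y : α) :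
    (L.map (fun x => if x = y then (1 : Int) else 0)).sum = if y ∈ L then 1 else 0 := by
  induction L with
  | nil => simp
  | cons a L ih =>
    simp only [List.nodup_cons] at hL
    simp only [List.map_cons, List.sum_cons, List.mem_cons]
    by_cases hay : a = y
    · subst hay
      have : (L.map (fun x => if x = a then (1 : Int) else 0)).sum = 0 := by
        rw [ih hL.2]
        simp [hL.1]
      simp [this]
    · have hya : ¬ (y = a) := fun h => hay h.symm
      simp [hay, hya, ih hL.2]

-- sum of counts over a nodup list = sum of membership indicators over ys
theorem pvNodupSum {α : Type} [BEq α] [LawfulBEq α] [DecidableEq α] (L : List α) (hL : L.Nodup) (ys : List α) :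
    (L.map (fun x => ((ys.count x : Nat) : Int))).sum
    = (ys.map (fun y => if y ∈ L then (1 : Int) else 0)).sum := by
  induction ys with
  | nil => simp
  | cons y ys ih =>
    have h1 : L.map (fun x => (((y :: ys).count x : Nat) : Int))
        = L.map (fun x => ((ys.count x : Nat) : Int) + (if x = y then (1 : Int) else 0)) := by
      apply List.map_congr_left
      intro x _
      rw [List.count_cons]
      by_cases hxy : x = y
      · simp [hxy]
      · simp [hxy, Ne.symm hxy]
    rw [h1, pvSumMapAdd, ih, pvNodupInd L hL y]
    simp only [List.map_cons, List.sum_cons]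
    ring

-- characterisation of A
theorem pvAChar (o t : String) :
    getPreference o t
    = ((t.toList).map (fun y => if y ∈ o.toList then (1 : Int) else 0)).sum
      + ((pvPairs t.toList).map (fun p => if p ∈ pvPairs o.toList then (1 : Int) else 0)).sum := by
  show (List.range t.toList.length).foldl
      (fun pref i =>
        let pref := if (((List.range o.toList.length).foldl
              (fun (st : PySem.Dict Char Int × PySem.Dict (Char × Char) Int) i =>
                let st := (st.1.insert (o.toList.getD i ' ') 1, st.2)
                if i + 1 < o.toList.length then
                  (st.1, st.2.insert (o.toList.getD i ' ', o.toList.getD (i + 1) ' ') 1)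
                else st)
              (PySem.Dict.empty, PySem.Dict.empty)).1).contains (t.toList.getD i ' ') then pref + 1 else pref
        if i + 1 < t.toList.length then
          let a := t.toList.getD i ' '
          let b := t.toList.getD (i + 1) ' '
          let c := (a, b)
          if (((List.range o.toList.length).foldl
              (fun (st : PySem.Dict Char Int × PySem.Dict (Char × Char) Int) i =>
                let st := (st.1.insert (o.toList.getD i ' ') 1, st.2)
                if i + 1 < o.toList.length then
                  (st.1, st.2.insert (o.toList.getD i ' ', o.toList.getD (i + 1) ' ') 1)
                else st)
              (PySem.Dict.empty, PySem.Dict.empty)).2).contains c then pref + 1 else pref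
        else pref)
      0
    = _
  rw [pvALoopEq, pvAFoldSplit]
  dsimp only
  rw [pvSumMapAdd]
  have hletter :
      ((List.range t.toList.length).map (fun i =>
        if ((List.range o.toList.length).foldl
              (fun (d : PySem.Dict Char Int) i => d.insert (o.toList.getD i ' ') 1)
              PySem.Dict.empty).contains (t.toList.getD i ' ') then (1 : Int) else 0)).sum
      = ((t.toList).map (fun y => if y ∈ o.toList then (1 : Int) else 0)).sum := by
    have h1 : (List.range t.toList.length).map (fun i =>
          if ((List.range o.toList.length).foldl
                (fun (d : PySem.Dict Char Int) i => d.insert (o.toList.getD i ' ') 1)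
                PySem.Dict.empty).contains (t.toList.getD i ' ') then (1 : Int) else 0)
        = (List.range t.toList.length).map (fun i =>
            if (t.toList.getD i ' ') ∈ o.toList then (1 : Int) else 0) := by
      apply List.map_congr_left
      intro i _
      by_cases h : (t.toList.getD i ' ') ∈ o.toList
      · rw [if_pos ((pvSlContains o.toList _).mpr h), if_pos h]
      · rw [if_neg (fun hc => h ((pvSlContains o.toList _).mp hc)), if_neg h]
    rw [h1]
    have h2 : (List.range t.toList.length).map (fun i =>
          if (t.toList.getD i ' ') ∈ o.toList then (1 : Int) else 0)
        = ((List.range t.toList.length).map (fun i => t.toList.getD i ' ')).map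
            (fun y => if y ∈ o.toList then (1 : Int) else 0) := by
      rw [List.map_map]; rfl
    rw [h2, pvMapRange_getD]
  have hpair :
      ((List.range t.toList.length).map (fun i =>
        if i + 1 < t.toList.length ∧
            ((List.range o.toList.length).foldl
              (fun (d : PySem.Dict (Char × Char) Int) i =>
                if i + 1 < o.toList.length then d.insert (o.toList.getD i ' ', o.toList.getD (i + 1) ' ') 1 else d)
              PySem.Dict.empty).contains (t.toList.getD i ' ', t.toList.getD (i + 1) ' ')
          then (1 : Int) else 0)).sum
      = ((pvPairs t.toList).map (fun p => if p ∈ pvPairs o.toList then (1 : Int) else 0)).sum := by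
    rw [pvGateDrop]
    have h1 : (List.range (t.toList.length - 1)).map (fun i =>
          if ((List.range o.toList.length).foldl
                (fun (d : PySem.Dict (Char × Char) Int) i =>
                  if i + 1 < o.toList.length then d.insert (o.toList.getD i ' ', o.toList.getD (i + 1) ' ') 1 else d)
                PySem.Dict.empty).contains (t.toList.getD i ' ', t.toList.getD (i + 1) ' ')
            then (1 : Int) else 0)
        = (pvPairs t.toList).map (fun p => if p ∈ pvPairs o.toList then (1 : Int) else 0) := by
      rw [pvMapPairs]
      apply List.map_congr_left
      intro i _
      by_cases h : (t.toList.getD i ' ', t.toList.getD (i + 1) ' ') ∈ pvPairs o.toList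
      · rw [if_pos ((pvSpContains o.toList _).mpr h), if_pos h]
      · rw [if_neg (fun hc => h ((pvSpContains o.toList _).mp hc)), if_neg h]
    rw [h1]
  rw [hletter, hpair]
  ring

-- characterisation of B
theorem pvBChar (o t : String) :
    getPreference_alt o t
    = ((t.toList).map (fun y => if y ∈ o.toList then (1 : Int) else 0)).sum
      + ((pvPairs t.toList).map (fun p => if p ∈ pvPairs o.toList then (1 : Int) else 0)).sum := by
  show ((PySem.Set.ofList o.toList).map
        (fun ch => (t.toList.foldl (fun (d : PySem.Dict Char Int) ch => d.insert ch (d.getD ch 0 + 1))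
          PySem.Dict.empty).getD ch 0)).sum
      + ((PySem.Set.ofList (pvPairs o.toList)).map
        (fun p => ((pvPairs t.toList).foldl
            (fun (d : PySem.Dict (Char × Char) Int) p => d.insert p (d.getD p 0 + 1))
            PySem.Dict.empty).getD p 0)).sum
      = _
  have hl : (PySem.Set.ofList o.toList).map
        (fun ch => (t.toList.foldl (fun (d : PySem.Dict Char Int) ch => d.insert ch (d.getD ch 0 + 1))
          PySem.Dict.empty).getD ch 0)
      = (PySem.Set.ofList o.toList).map (fun ch => ((t.toList.count ch : Nat) : Int)) := by
    apply List.map_congr_left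
    intro x _
    rw [PySem.Dict.getD_foldl_insert_add_one, PySem.Dict.getD_empty]
    simp
  have hb : (PySem.Set.ofList (pvPairs o.toList)).map
        (fun p => ((pvPairs t.toList).foldl
            (fun (d : PySem.Dict (Char × Char) Int) p => d.insert p (d.getD p 0 + 1))
            PySem.Dict.empty).getD p 0)
      = (PySem.Set.ofList (pvPairs o.toList)).map (fun p => (((pvPairs t.toList).count p : Nat) : Int)) := by
    apply List.map_congr_left
    intro x _
    rw [PySem.Dict.getD_foldl_insert_add_one, PySem.Dict.getD_empty]
    simp
  rw [hl, hb]
  rw [pvNodupSum (PySem.Set.ofList o.toList) (PySem.Set.nodup_ofList _) t.toList]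
  rw [pvNodupSum (PySem.Set.ofList (pvPairs o.toList)) (PySem.Set.nodup_ofList _) (pvPairs t.toList)]
  have h1 : (t.toList).map (fun y => if y ∈ PySem.Set.ofList o.toList then (1 : Int) else 0)
      = (t.toList).map (fun y => if y ∈ o.toList then (1 : Int) else 0) := by
    apply List.map_congr_left
    intro y _
    by_cases h : y ∈ o.toList
    · rw [if_pos ((PySem.Set.mem_ofList _ _).mpr h), if_pos h]
    · rw [if_neg (fun hc => h ((PySem.Set.mem_ofList _ _).mp hc)), if_neg h]
  have h2 : (pvPairs t.toList).map (fun p => if p ∈ PySem.Set.ofList (pvPairs o.toList) then (1 : Int) else 0)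
      = (pvPairs t.toList).map (fun p => if p ∈ pvPairs o.toList then (1 : Int) else 0) := by
    apply List.map_congr_left
    intro p _
    by_cases h : p ∈ pvPairs o.toList
    · rw [if_pos ((PySem.Set.mem_ofList _ _).mpr h), if_pos h]
    · rw [if_neg (fun hc => h ((PySem.Set.mem_ofList _ _).mp hc)), if_neg h]
  rw [h1, h2]

-- ===== VERDICT (by name: the statement is the Claim_ definition above) =====
theorem getPreference_spec : Claim_equal_getPreference := by
  intro own_word other_word _
  unfold Spec_getPreference
  rw [pvAChar, pvBChar]
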